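-- pv_equiv track=rewrite | github.com/edilaitin/JSS-SA | jss.py | check_valid_schedule
-- ===== SOURCE A (Python) =====
-- import itertools
--
-- def check_valid_schedule(schedule):
--     flatten = list(itertools.chain(*schedule))
--     sorted_jobs = sorted(flatten, key=lambda x: (x[0][0], x[0][1]))
--     for i in range(len(sorted_jobs)):
--         if i > 0 and sorted_jobs[i - 1][0][0] == sorted_jobs[i][0][0]:
--             if sorted_jobs[i - 1][2] > sorted_jobs[i][1]:
--                 return False
--     return True
-- ===== SOURCE B (Python) =====
-- def check_valid_schedule(schedule):
--     ops = [op for job in schedule for op in job]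
--     for jid in {op[0][0] for op in ops}:
--         group = sorted((op for op in ops if op[0][0] == jid), key=lambda op: op[0][1])
--         if any(p[2] > c[1] for p, c in zip(group, group[1:])):
--             return False
--     return True
-- ===== Notes on version B (the rewrite author's own statement) =====
-- stated objective: alternative
-- what changed: Replaces A's single global sort by the tuple key (id, order) followed by a guarded adjacent-pair scan with a per-job-id decomposition: for each distinct id, filter that id's operations, stable-sort them by order alone, and check adjacent pairs within the group.
import Mathlib
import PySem

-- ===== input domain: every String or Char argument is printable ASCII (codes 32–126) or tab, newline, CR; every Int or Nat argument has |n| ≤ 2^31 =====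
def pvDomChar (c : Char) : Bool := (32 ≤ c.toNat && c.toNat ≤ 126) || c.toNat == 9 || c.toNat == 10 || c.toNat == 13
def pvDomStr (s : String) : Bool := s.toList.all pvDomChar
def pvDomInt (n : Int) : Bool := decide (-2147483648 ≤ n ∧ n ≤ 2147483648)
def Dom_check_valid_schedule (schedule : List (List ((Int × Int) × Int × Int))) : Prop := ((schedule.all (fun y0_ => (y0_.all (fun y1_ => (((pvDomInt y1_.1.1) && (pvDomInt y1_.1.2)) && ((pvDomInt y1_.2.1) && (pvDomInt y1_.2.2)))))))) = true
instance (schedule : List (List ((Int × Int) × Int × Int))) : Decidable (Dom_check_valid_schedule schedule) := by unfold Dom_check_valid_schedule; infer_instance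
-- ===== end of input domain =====

-- B replaces A's single global sort by (id, order) + guarded adjacent scan with a per-id
-- decomposition (filter each id's operations, sort them by order, check adjacent pairs);
-- objective: alternative structure, same observable result.

abbrev PvOp : Type := (Int × Int) × Int × Int

-- ===== PORT A =====
-- 'for i in range(len(sorted_jobs))' with early 'return False': index recursion; inside the
-- loop both indices are in range, so getD is exact for sorted_jobs[i-1] / sorted_jobs[i].
def pvALoop (sj : List PvOp) (i : Nat) : Bool :=
  if _h : i < sj.length then
    if i > 0 && ((sj.getD (i - 1) default).1.1 == (sj.getD i default).1.1) then
      if (sj.getD (i - 1) default).2.2 > (sj.getD i default).2.1 then false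
      else pvALoop sj (i + 1)
    else pvALoop sj (i + 1)
  else true
termination_by sj.length - i

def check_valid_schedule (schedule : List (List ((Int × Int) × Int × Int))) : Bool :=
  let flatten := schedule.flatten
  let sorted_jobs := PySem.List.sorted2 flatten (fun x => x.1.1) (fun x => x.1.2)
  pvALoop sorted_jobs 0

-- ===== PORT B =====
-- 'any(p[2] > c[1] for p, c in zip(group, group[1:]))'
def pvAnyOverlap : List PvOp → Bool
  | p :: c :: t => decide (p.2.2 > c.2.1) || pvAnyOverlap (c :: t)
  | _ => false

def check_valid_schedule_alt (schedule : List (List ((Int × Int) × Int × Int))) : Bool :=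
  let ops := schedule.flatMap (fun job => job)
  (PySem.Set.ofList (ops.map (fun op => op.1.1))).all (fun jid =>
    !pvAnyOverlap (PySem.List.sorted (ops.filter (fun op => op.1.1 == jid)) (fun op => op.1.2)))

-- ===== PRECONDITION & SPEC =====
def Spec_check_valid_schedule (schedule : List (List ((Int × Int) × Int × Int))) (out : Bool) : Prop := out = check_valid_schedule_alt schedule
instance (schedule : List (List ((Int × Int) × Int × Int))) (out : Bool) : Decidable (Spec_check_valid_schedule schedule out) := by unfold Spec_check_valid_schedule; infer_instance

-- ===== CLAIM (what is proved, stated in full; the proofs are below) =====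
def Claim_equal_check_valid_schedule : Prop := ∀ (schedule : List (List ((Int × Int) × Int × Int))), Dom_check_valid_schedule schedule → Spec_check_valid_schedule schedule (check_valid_schedule schedule)

-- ===== LEMMAS AND PROOFS =====

-- abbreviations used only by the proofs
def pvLt2 (a b : PvOp) : Bool :=
  decide (a.1.1 < b.1.1) || !decide (b.1.1 < a.1.1) && decide (a.1.2 < b.1.2)

def pvLtk (a b : PvOp) : Bool := decide (a.1.2 < b.1.2)

def pvBucket (xs : List PvOp) (k : Int) : List PvOp :=
  PySem.List.sorted (xs.filter (fun op => op.1.1 == k)) (fun op => op.1.2)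

def pvKeys (xs : List PvOp) : List Int :=
  PySem.List.sorted (PySem.Set.ofList (xs.map (fun op => op.1.1))) (fun x => x)

-- the guarded adjacent-pair check A performs, as structural recursion
def pvSameIdChain : List PvOp → Bool
  | a :: b :: t =>
      (if a.1.1 == b.1.1 then decide (a.2.2 ≤ b.2.1) else true) && pvSameIdChain (b :: t)
  | _ => true

def pvChainOk : List PvOp → Bool
  | a :: b :: t => decide (a.2.2 ≤ b.2.1) && pvChainOk (b :: t)
  | _ => true

theorem pvChainOk_eq_not_anyOverlap (l : List PvOp) : pvChainOk l = !pvAnyOverlap l := by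
  induction l with
  | nil => rfl
  | cons a t ih =>
    cases t with
    | nil => rfl
    | cons b u =>
      simp only [pvChainOk, pvAnyOverlap, ih, Bool.not_or]
      by_cases h : a.2.2 ≤ b.2.1 <;> simp [h]

-- A's index loop equals the structural adjacent-pair scan
theorem pvALoop_eq_chain_drop (sj : List PvOp) (j : Nat) :
    pvALoop sj (j + 1) = pvSameIdChain (sj.drop j) := by
  by_cases h : j + 1 < sj.length
  · have hj : j < sj.length := by omega
    have hj1 : j + 1 < sj.length := h
    have hdrop : sj.drop j = sj[j] :: sj[j+1] :: sj.drop (j + 2) := by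
      rw [List.drop_eq_getElem_cons hj, List.drop_eq_getElem_cons hj1]
    have hd1 : sj.getD j default = sj[j] := List.getD_eq_getElem sj default hj
    have hd2 : sj.getD (j + 1) default = sj[j+1] := List.getD_eq_getElem sj default hj1
    have ih : pvALoop sj (j + 1 + 1) = pvSameIdChain (sj.drop (j + 1)) :=
      pvALoop_eq_chain_drop sj (j + 1)
    rw [pvALoop]
    simp only [h, dif_pos, Nat.add_sub_cancel, hd1, hd2]
    rw [hdrop, pvSameIdChain]
    have hdrop1 : sj.drop (j + 1) = sj[j+1] :: sj.drop (j + 2) := by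
      rw [List.drop_eq_getElem_cons hj1]
    rw [ih, hdrop1]
    by_cases hid : sj[j].1.1 = sj[j+1].1.1
    · simp only [hid, beq_self_eq_true, if_true]
      by_cases hov : sj[j].2.2 > sj[j+1].2.1
      · simp [hov]
      · have : sj[j].2.2 ≤ sj[j+1].2.1 := by omega
        simp [hov, this]
    · have : (sj[j].1.1 == sj[j+1].1.1) = false := by simp [hid]
      simp [this]
  · rw [pvALoop]
    have hlen : sj.length ≤ j + 1 := by omega
    simp only [dif_neg (by omega : ¬ j + 1 < sj.length)]
    rcases Nat.lt_or_ge j sj.length with hj | hj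
    · have : sj.length = j + 1 := by omega
      have : (sj.drop j).length = 1 := by simp [List.length_drop, this]
      rcases List.length_eq_one_iff.mp this with ⟨a, ha⟩
      rw [ha]; rfl
    · rw [List.drop_eq_nil_of_le hj]; rfl
termination_by sj.length - j

theorem pvALoop_zero (sj : List PvOp) : pvALoop sj 0 = pvSameIdChain sj := by
  rw [pvALoop]
  by_cases h : 0 < sj.length
  · simp only [dif_pos h]
    have := pvALoop_eq_chain_drop sj 0
    simpa using this
  · have : sj = [] := by
      cases sj with
      | nil => rfl
      | cons a t => simp at h
    simp [this, pvSameIdChain]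

-- insertBy facts
theorem pv_insertBy_append_of_not {before : PvOp → PvOp → Bool} {x : PvOp} {A B : List PvOp}
    (h : ∀ y ∈ A, before x y = false) :
    PySem.List.insertBy before x (A ++ B) = A ++ PySem.List.insertBy before x B := by
  induction A with
  | nil => rfl
  | cons a t ih =>
    have ha : before x a = false := h a (by simp)
    simp only [List.cons_append, PySem.List.insertBy, ha]
    simp only [Bool.false_eq_true, if_false]
    rw [ih (fun y hy => h y (by simp [hy]))]

theorem pv_insertBy_cons_of_forall {before : PvOp → PvOp → Bool} {x : PvOp} {L : List PvOp}
    (h : ∀ y ∈ L, before x y = true) :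
    PySem.List.insertBy before x L = x :: L := by
  cases L with
  | nil => rfl
  | cons a t => simp [PySem.List.insertBy, h a (by simp)]

theorem pv_insertBy_block {x : PvOp} {B rest : List PvOp}
    (hB : ∀ y ∈ B, pvLt2 x y = pvLtk x y) (hrest : ∀ y ∈ rest, pvLt2 x y = true) :
    PySem.List.insertBy pvLt2 x (B ++ rest) =
      PySem.List.insertBy pvLtk x B ++ rest := by
  induction B with
  | nil =>
    simp only [List.nil_append]
    rw [pv_insertBy_cons_of_forall hrest]; rfl
  | cons b t ih =>
    have hb : pvLt2 x b = pvLtk x b := hB b (by simp)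
    by_cases h : pvLtk x b = true
    · simp [PySem.List.insertBy, hb, h]
    · have h' : pvLtk x b = false := by revert h; cases pvLtk x b <;> simp
      simp only [List.cons_append, PySem.List.insertBy, hb, h', Bool.false_eq_true, if_false]
      rw [ih (fun y hy => hB y (by simp [hy]))]

theorem pv_flatMap_congr {α β : Type} {L : List α} {f g : α → List β}
    (h : ∀ k ∈ L, f k = g k) : L.flatMap f = L.flatMap g := by
  induction L with
  | nil => rfl
  | cons a t ih =>
    simp only [List.flatMap_cons]
    rw [h a (by simp), ih (fun k hk => h k (by simp [hk]))]

-- inserting x into the block decomposition when its id is already a key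
theorem pv_insert_existing_key {x : PvOp} {L : List Int} {f : Int → List PvOp}
    (hL : L.Pairwise (· < ·)) (hf : ∀ k ∈ L, ∀ y ∈ f k, y.1.1 = k) (hmem : x.1.1 ∈ L) :
    PySem.List.insertBy pvLt2 x (L.flatMap f) =
      L.flatMap (fun k => if k = x.1.1 then PySem.List.insertBy pvLtk x (f k) else f k) := by
  induction L with
  | nil => simp at hmem
  | cons k ks ih =>
    have hpw := (List.pairwise_cons.mp hL)
    by_cases hk : k = x.1.1
    · have hxk : x.1.1 = k := hk.symm
      have hnot : k ∉ ks := fun h => lt_irrefl k (hpw.1 k h)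
      have hBlock : ∀ y ∈ f k, pvLt2 x y = pvLtk x y := by
        intro y hy
        have hid : y.1.1 = k := hf k (by simp) y hy
        simp [pvLt2, pvLtk, hid, ← hxk]
      have hRest : ∀ y ∈ ks.flatMap f, pvLt2 x y = true := by
        intro y hy
        rcases List.mem_flatMap.mp hy with ⟨k', hk', hy'⟩
        have hid : y.1.1 = k' := hf k' (by simp [hk']) y hy'
        have hlt : x.1.1 < k' := hxk ▸ hpw.1 k' hk'
        simp [pvLt2, hid, hlt]
      rw [List.flatMap_cons, pv_insertBy_block hBlock hRest, List.flatMap_cons, if_pos hk]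
      congr 1
      refine pv_flatMap_congr (fun k' hk' => ?_)
      have hne : k' ≠ x.1.1 := by
        intro h
        apply hnot
        rw [hk, ← h]
        exact hk'
      simp [hne]
    · have hmem' : x.1.1 ∈ ks := by
        rcases List.mem_cons.mp hmem with h | h
        · exact absurd h.symm hk
        · exact h
      have hlt : k < x.1.1 := hpw.1 _ hmem'
      have hNot : ∀ y ∈ f k, pvLt2 x y = false := by
        intro y hy
        have hid : y.1.1 = k := hf k (by simp) y hy
        simp [pvLt2, hid]
        omega
      rw [List.flatMap_cons, pv_insertBy_append_of_not hNot,
        ih hpw.2 (fun k' hk' => hf k' (by simp [hk'])) hmem', List.flatMap_cons, if_neg hk]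
  
-- inserting x into the block decomposition when its id is a new key
theorem pv_insert_new_key {x : PvOp} {L : List Int} {f : Int → List PvOp}
    (hL : L.Pairwise (· < ·)) (hf : ∀ k ∈ L, ∀ y ∈ f k, y.1.1 = k) (hmem : x.1.1 ∉ L) :
    PySem.List.insertBy pvLt2 x (L.flatMap f) =
      (PySem.List.insertBy (fun a b => decide (a < b)) x.1.1 L).flatMap
        (fun k => if k = x.1.1 then [x] else f k) := by
  induction L with
  | nil => simp [PySem.List.insertBy]
  | cons k ks ih =>
    have hpw := (List.pairwise_cons.mp hL)
    have hne : x.1.1 ≠ k := by intro h; exact hmem (by simp [h])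
    by_cases hlt : x.1.1 < k
    · have hAll : ∀ y ∈ (k :: ks).flatMap f, pvLt2 x y = true := by
        intro y hy
        rcases List.mem_flatMap.mp hy with ⟨k', hk', hy'⟩
        have hid : y.1.1 = k' := hf k' hk' y hy'
        have : x.1.1 < k' := by
          rcases List.mem_cons.mp hk' with h | h
          · rw [h]; exact hlt
          · exact lt_trans hlt (hpw.1 _ h)
        simp [pvLt2, hid]
        omega
      rw [pv_insertBy_cons_of_forall hAll]
      have hkeys : PySem.List.insertBy (fun a b => decide (a < b)) x.1.1 (k :: ks) =
          x.1.1 :: k :: ks := by simp [PySem.List.insertBy, hlt]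
      have hall : ∀ k' ∈ k :: ks, (if k' = x.1.1 then [x] else f k') = f k' := by
        intro k' hk'
        have : k' ≠ x.1.1 := fun h => hmem (h ▸ hk')
        simp [this]
      have hR : List.flatMap (fun k' => if k' = x.1.1 then [x] else f k') (x.1.1 :: k :: ks)
          = [x] ++ List.flatMap f (k :: ks) := by
        rw [List.flatMap_cons, pv_flatMap_congr hall]
        simp
      rw [hkeys, hR]
      simp
    · have hgt : k < x.1.1 := by
        rcases lt_trichotomy x.1.1 k with h | h | h
        · exact absurd h hlt
        · exact absurd h hne
        · exact h
      have hNot : ∀ y ∈ f k, pvLt2 x y = false := by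
        intro y hy
        have hid : y.1.1 = k := hf k (by simp) y hy
        simp [pvLt2, hid]
        omega
      have hmem' : x.1.1 ∉ ks := fun h => hmem (by simp [h])
      rw [List.flatMap_cons, pv_insertBy_append_of_not hNot,
        ih hpw.2 (fun k' hk' => hf k' (by simp [hk'])) hmem']
      have hkeys : PySem.List.insertBy (fun a b => decide (a < b)) x.1.1 (k :: ks) =
          k :: PySem.List.insertBy (fun a b => decide (a < b)) x.1.1 ks := by
        simp [PySem.List.insertBy, hlt]
      have hne' : k ≠ x.1.1 := fun h => hne h.symm
      rw [hkeys, List.flatMap_cons, if_neg hne']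

-- bucket elements carry their key
theorem pv_bucket_id (xs : List PvOp) (k : Int) : ∀ y ∈ pvBucket xs k, y.1.1 = k := by
  intro y hy
  have : y ∈ xs.filter (fun op => op.1.1 == k) := (PySem.List.mem_sorted _ _ _ _).mp hy
  have := List.of_mem_filter this
  simpa using this

theorem pv_keys_pairwise (xs : List PvOp) : (pvKeys xs).Pairwise (· < ·) :=
  PySem.List.sorted_ofList_pairwise_lt _

theorem pv_mem_keys (xs : List PvOp) (k : Int) :
    k ∈ pvKeys xs ↔ k ∈ xs.map (fun op => op.1.1) := by
  unfold pvKeys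
  rw [PySem.List.mem_sorted, PySem.Set.mem_ofList]

-- sorted over an appended element is an insertion (both are foldl of insertBy)
theorem pv_sorted2_append (xs : List PvOp) (x : PvOp) :
    PySem.List.sorted2 (xs ++ [x]) (fun y => y.1.1) (fun y => y.1.2) =
      PySem.List.insertBy pvLt2 x (PySem.List.sorted2 xs (fun y => y.1.1) (fun y => y.1.2)) := by
  unfold PySem.List.sorted2
  simp only [List.foldl_append, List.foldl_cons, List.foldl_nil]
  rfl

theorem pv_sorted_append (xs : List PvOp) (x : PvOp) :
    PySem.List.sorted (xs ++ [x]) (fun y => y.1.2) =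
      PySem.List.insertBy pvLtk x (PySem.List.sorted xs (fun y => y.1.2)) := by
  unfold PySem.List.sorted
  simp only [List.foldl_append, List.foldl_cons, List.foldl_nil]
  rfl

theorem pv_sorted_int_append (S : List Int) (k : Int) :
    PySem.List.sorted (S ++ [k]) (fun y => y) =
      PySem.List.insertBy (fun a b => decide (a < b)) k (PySem.List.sorted S (fun y => y)) := by
  unfold PySem.List.sorted
  simp only [List.foldl_append, List.foldl_cons, List.foldl_nil]
  rfl

-- THE STRUCTURE LEMMA: the global (id, order) stable sort is the concatenation of the
-- per-id buckets in increasing id order.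
theorem pv_sorted2_eq_blocks (xs : List PvOp) :
    PySem.List.sorted2 xs (fun y => y.1.1) (fun y => y.1.2) =
      (pvKeys xs).flatMap (pvBucket xs) := by
  induction xs using List.reverseRecOn with
  | nil => rfl
  | append_singleton xs x ih =>
    rw [pv_sorted2_append, ih]
    by_cases hmem : x.1.1 ∈ pvKeys xs
    · rw [pv_insert_existing_key (pv_keys_pairwise xs)
        (fun k _ => pv_bucket_id xs k) hmem]
      have hkeys : pvKeys (xs ++ [x]) = pvKeys xs := by
        unfold pvKeys
        rw [List.map_append, List.map_singleton, PySem.Set.ofList_append_singleton,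
          PySem.Set.add_of_mem]
        rw [PySem.Set.mem_ofList]
        exact (pv_mem_keys xs x.1.1).mp hmem
      rw [hkeys]
      refine pv_flatMap_congr (fun k hk => ?_)
      by_cases hkx : k = x.1.1
      · have hfl : List.filter (fun op => op.1.1 == k) [x] = [x] := by simp [hkx]
        rw [if_pos hkx]
        unfold pvBucket
        rw [List.filter_append, hfl, pv_sorted_append]
      · have hne : x.1.1 ≠ k := fun h => hkx h.symm
        have hfl : List.filter (fun op => op.1.1 == k) [x] = [] := by simp [hne]
        rw [if_neg hkx]
        unfold pvBucket
        rw [List.filter_append, hfl, List.append_nil]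
    · rw [pv_insert_new_key (pv_keys_pairwise xs)
        (fun k _ => pv_bucket_id xs k) hmem]
      have hkeys : pvKeys (xs ++ [x]) =
          PySem.List.insertBy (fun a b => decide (a < b)) x.1.1 (pvKeys xs) := by
        unfold pvKeys
        rw [List.map_append, List.map_singleton, PySem.Set.ofList_append_singleton,
          PySem.Set.add_of_not_mem, pv_sorted_int_append]
        rw [PySem.Set.mem_ofList]
        exact fun h => hmem ((pv_mem_keys xs x.1.1).mpr h)
      rw [hkeys]
      refine pv_flatMap_congr (fun k hk => ?_)
      by_cases hkx : k = x.1.1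
      · rw [if_pos hkx]
        have hfilter : xs.filter (fun op => op.1.1 == k) = [] := by
          rw [List.filter_eq_nil_iff]
          intro y hy h
          apply hmem
          apply (pv_mem_keys xs x.1.1).mpr
          have hyk : y.1.1 = x.1.1 := by
            have : y.1.1 = k := by simpa using h
            rw [this, hkx]
          exact hyk ▸ List.mem_map_of_mem hy
        have hfl1 : List.filter (fun op => op.1.1 == k) [x] = [x] := by simp [hkx]
        unfold pvBucket
        rw [List.filter_append, hfilter, hfl1, List.nil_append]
        rfl
      · have hne : x.1.1 ≠ k := fun h => hkx h.symm
        have hfl : List.filter (fun op => op.1.1 == k) [x] = [] := by simp [hne]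
        rw [if_neg hkx]
        unfold pvBucket
        rw [List.filter_append, hfl, List.append_nil]

-- the guarded scan over the block decomposition is the conjunction of per-block scans
theorem pv_chain_block_append {k : Int} (B rest : List PvOp)
    (hB : ∀ y ∈ B, y.1.1 = k) (hrest : ∀ y ∈ rest, y.1.1 ≠ k) :
    pvSameIdChain (B ++ rest) = (pvChainOk B && pvSameIdChain rest) := by
  induction B with
  | nil => simp [pvChainOk]
  | cons b t ih =>
    cases t with
    | nil =>
      cases rest with
      | nil => simp [pvSameIdChain, pvChainOk]
      | cons r rs =>
        have : (b.1.1 == r.1.1) = false := by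
          have hb : b.1.1 = k := hB b (by simp)
          have hr : r.1.1 ≠ k := hrest r (by simp)
          simp [hb]
          exact fun h => hr h.symm
        simp [pvSameIdChain, pvChainOk, this]
    | cons b2 t2 =>
      have hb : b.1.1 = k := hB b (by simp)
      have hb2 : b2.1.1 = k := hB b2 (by simp)
      have heq : (b.1.1 == b2.1.1) = true := by simp [hb, hb2]
      simp only [List.cons_append, pvSameIdChain, pvChainOk, heq, if_pos]
      rw [← List.cons_append, ih (fun y hy => hB y (by simp [hy]))]
      simp [Bool.and_assoc]

theorem pv_chain_flatMap (L : List Int) (f : Int → List PvOp)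
    (hL : L.Pairwise (· < ·)) (hf : ∀ k ∈ L, ∀ y ∈ f k, y.1.1 = k) :
    pvSameIdChain (L.flatMap f) = L.all (fun k => pvChainOk (f k)) := by
  induction L with
  | nil => rfl
  | cons k ks ih =>
    have hpw := List.pairwise_cons.mp hL
    rw [List.flatMap_cons,
      pv_chain_block_append (k := k) (f k) (ks.flatMap f) (hf k (by simp))
        (by
          intro y hy
          rcases List.mem_flatMap.mp hy with ⟨k', hk', hy'⟩
          have : y.1.1 = k' := hf k' (by simp [hk']) y hy'
          have : k < k' := hpw.1 k' hk'
          intro h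
          omega),
      ih hpw.2 (fun k' hk' => hf k' (by simp [hk']))]
    simp

-- all over a permutation
theorem pv_all_perm {α : Type} {l₁ l₂ : List α} (h : l₁.Perm l₂) (p : α → Bool) :
    l₁.all p = l₂.all p := by
  rcases hb : l₂.all p with _ | _
  · rw [Bool.eq_false_iff]
    intro hc
    rw [List.all_eq_true] at hc
    rw [List.all_eq_false] at hb
    rcases hb with ⟨x, hx, hpx⟩
    exact hpx (hc x (h.mem_iff.mpr hx))
  · rw [List.all_eq_true] at hb ⊢
    exact fun x hx => hb x (h.mem_iff.mp hx)

theorem pv_all_congr {α : Type} {l : List α} {p q : α → Bool}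
    (h : ∀ x ∈ l, p x = q x) : l.all p = l.all q := by
  induction l with
  | nil => rfl
  | cons a t ih =>
    simp only [List.all_cons, h a (by simp), ih (fun x hx => h x (by simp [hx]))]

-- ===== VERDICT (by name: the statement is the Claim_ definition above) =====
theorem check_valid_schedule_spec : Claim_equal_check_valid_schedule := by
  intro schedule _
  unfold Spec_check_valid_schedule check_valid_schedule check_valid_schedule_alt
  simp only []
  have hflat : schedule.flatMap (fun job => job) = schedule.flatten := by
    simp
  set xs := schedule.flatten with hxs
  rw [hflat]
  rw [pvALoop_zero, pv_sorted2_eq_blocks,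
    pv_chain_flatMap (pvKeys xs) (pvBucket xs) (pv_keys_pairwise xs)
      (fun k _ => pv_bucket_id xs k)]
  have hperm : (pvKeys xs).Perm (PySem.Set.ofList (xs.map (fun op => op.1.1))) :=
    PySem.List.sorted_perm _ _ _
  rw [pv_all_perm hperm]
  refine pv_all_congr (fun k _ => ?_)
  rw [pvChainOk_eq_not_anyOverlap]
  rfl
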